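-- pv_equiv track=rewrite | github.com/anuragumale2002/github_clone | compat/compare.py | compare_tree_maps
-- ===== SOURCE A (Python) =====
-- from typing import Dict, List, Optional, Set, Tuple
--
-- def compare_tree_maps(
--     map_a: Dict[str, str],
--     map_b: Dict[str, str],
-- ) -> Tuple[bool, List[str]]:
--     """Compare two path->blob maps. Return (equal, list of diff messages)."""
--     diffs: List[str] = []
--     all_paths = set(map_a) | set(map_b)
--     for p in sorted(all_paths):
--         sha_a = map_a.get(p)
--         sha_b = map_b.get(p)
--         if sha_a is None:
--             diffs.append(f"path only in B: {p} -> {sha_b}")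
--         elif sha_b is None:
--             diffs.append(f"path only in A: {p} -> {sha_a}")
--         elif sha_a != sha_b:
--             diffs.append(f"path {p}: A={sha_a} B={sha_b}")
--     return (len(diffs) == 0, diffs)
-- ===== SOURCE B (Python) =====
-- def compare_tree_maps(map_a, map_b):
--     """Compare two path->blob maps. Return (equal, list of diff messages)."""
--     only_a = [(p, f"path only in A: {p} -> {map_a[p]}") for p in map_a if p not in map_b]
--     only_b = [(p, f"path only in B: {p} -> {map_b[p]}") for p in map_b if p not in map_a]
--     changed = [(p, f"path {p}: A={map_a[p]} B={map_b[p]}")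
--                for p in map_a if p in map_b and map_a[p] != map_b[p]]
--     combined = sorted(only_a + only_b + changed, key=lambda t: t[0])
--     diffs = [msg for _, msg in combined]
--     return (len(diffs) == 0, diffs)
-- ===== Notes on version B (the rewrite author's own statement) =====
-- stated objective: alternative
-- what changed: B classifies paths into three comprehension-built groups (only-in-A, only-in-B, changed) and merges them with one key-sort of (path, message) tuples, instead of A's single pass over the sorted union of key sets with per-path dict lookups and an if/elif chain.
import Mathlib
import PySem

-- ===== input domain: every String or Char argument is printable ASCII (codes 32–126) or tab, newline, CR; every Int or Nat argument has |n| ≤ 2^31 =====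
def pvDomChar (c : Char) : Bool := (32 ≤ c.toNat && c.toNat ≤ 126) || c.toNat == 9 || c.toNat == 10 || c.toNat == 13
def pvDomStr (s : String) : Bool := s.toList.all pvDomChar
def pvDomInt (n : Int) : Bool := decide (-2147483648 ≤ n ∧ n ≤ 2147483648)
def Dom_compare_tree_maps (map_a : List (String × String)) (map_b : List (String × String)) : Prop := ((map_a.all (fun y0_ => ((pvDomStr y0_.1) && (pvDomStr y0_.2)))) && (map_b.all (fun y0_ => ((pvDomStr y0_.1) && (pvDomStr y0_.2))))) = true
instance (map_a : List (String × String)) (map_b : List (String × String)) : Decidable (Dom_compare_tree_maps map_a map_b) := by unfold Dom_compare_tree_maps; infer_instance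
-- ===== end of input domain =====

-- B replaces A's single pass over the sorted union of key sets by classifying paths into three
-- groups (only-in-A, only-in-B, changed) and merging them with one key-sort of (path, message)
-- tuples; an alternative decomposition of the same cost.

-- ===== PORT A =====
-- f"{x}" on an Optional[str]: the value itself, or "None"
def pvOptStr : Option String → String
  | none => "None"
  | some s => s

def compare_tree_maps (map_a : List (String × String)) (map_b : List (String × String)) : Bool × List String :=
  let da : PySem.Dict String String := PySem.Dict.mk map_a
  let db : PySem.Dict String String := PySem.Dict.mk map_b
  let all_paths := PySem.Set.union (PySem.Set.ofList da.keys) db.keys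
  let diffs := (PySem.List.sorted all_paths (fun p => p)).foldl (fun diffs p =>
    let sha_a := da.get? p
    let sha_b := db.get? p
    if sha_a = none then diffs ++ ["path only in B: " ++ p ++ " -> " ++ pvOptStr sha_b]
    else if sha_b = none then diffs ++ ["path only in A: " ++ p ++ " -> " ++ pvOptStr sha_a]
    else if sha_a ≠ sha_b then diffs ++ ["path " ++ p ++ ": A=" ++ pvOptStr sha_a ++ " B=" ++ pvOptStr sha_b]
    else diffs) []
  (decide (diffs.length = 0), diffs)

-- ===== PORT B =====
def compare_tree_maps_alt (map_a : List (String × String)) (map_b : List (String × String)) : Bool × List String :=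
  let da : PySem.Dict String String := PySem.Dict.mk map_a
  let db : PySem.Dict String String := PySem.Dict.mk map_b
  let only_a := (da.keys.filter (fun p => !(db.contains p))).map
      (fun p => (p, "path only in A: " ++ p ++ " -> " ++ da.getD p ""))
  let only_b := (db.keys.filter (fun p => !(da.contains p))).map
      (fun p => (p, "path only in B: " ++ p ++ " -> " ++ db.getD p ""))
  let changed := (da.keys.filter (fun p => db.contains p && !(da.getD p "" == db.getD p ""))).map
      (fun p => (p, "path " ++ p ++ ": A=" ++ da.getD p "" ++ " B=" ++ db.getD p ""))
  let combined := PySem.List.sorted (only_a ++ only_b ++ changed) (fun t => t.1)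
  let diffs := combined.map (fun t => t.2)
  (decide (diffs.length = 0), diffs)

-- ===== PRECONDITION & SPEC =====
-- Pre_ only states that the association lists represent Python dicts (the declared argument type),
-- whose keys are necessarily unique; it excludes no actual Python input of A.
def Pre_compare_tree_maps (map_a : List (String × String)) (map_b : List (String × String)) : Prop :=
  (map_a.map Prod.fst).Nodup ∧ (map_b.map Prod.fst).Nodup
instance (map_a : List (String × String)) (map_b : List (String × String)) : Decidable (Pre_compare_tree_maps map_a map_b) := by unfold Pre_compare_tree_maps; infer_instance

def pvWitness_compare_tree_maps : (List (String × String)) × (List (String × String)) :=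
  ([("src/main.py", "a1"), ("README", "b2")], [("src/main.py", "c3")])

def Spec_compare_tree_maps (map_a : List (String × String)) (map_b : List (String × String)) (out : Bool × List String) : Prop := out = compare_tree_maps_alt map_a map_b
instance (map_a : List (String × String)) (map_b : List (String × String)) (out : Bool × List String) : Decidable (Spec_compare_tree_maps map_a map_b out) := by unfold Spec_compare_tree_maps; infer_instance

-- ===== CLAIM (what is proved, stated in full; the proofs are below) =====
def Claim_equal_compare_tree_maps : Prop := ∀ (map_a : List (String × String)) (map_b : List (String × String)), Dom_compare_tree_maps map_a map_b → Pre_compare_tree_maps map_a map_b → Spec_compare_tree_maps map_a map_b (compare_tree_maps map_a map_b)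

-- ===== LEMMAS AND PROOFS =====

-- the diff message A produces for path p (none = no diff)
def pvMsg (da db : PySem.Dict String String) (p : String) : Option String :=
  match da.get? p, db.get? p with
  | none, sb => some ("path only in B: " ++ p ++ " -> " ++ pvOptStr sb)
  | some sa, none => some ("path only in A: " ++ p ++ " -> " ++ sa)
  | some sa, some sb => if sa ≠ sb then some ("path " ++ p ++ ": A=" ++ sa ++ " B=" ++ sb) else none

-- the (path, message) pair B produces for path p
def pvPair (da db : PySem.Dict String String) (p : String) : Option (String × String) :=
  (pvMsg da db p).map (fun m => (p, m))

theorem pvFlatMap_toList_eq_filterMap {α β : Type} (f : α → Option β) (l : List α) :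
    l.flatMap (fun x => (f x).toList) = l.filterMap f := by
  induction l with
  | nil => rfl
  | cons a t ih => cases h : f a <;> simp [List.flatMap_cons, h, ih, List.filterMap_cons]

theorem pvA_diffs (da db : PySem.Dict String String) (xs : List String) :
    xs.foldl (fun diffs p =>
      if da.get? p = none then diffs ++ ["path only in B: " ++ p ++ " -> " ++ pvOptStr (db.get? p)]
      else if db.get? p = none then diffs ++ ["path only in A: " ++ p ++ " -> " ++ pvOptStr (da.get? p)]
      else if da.get? p ≠ db.get? p then diffs ++ ["path " ++ p ++ ": A=" ++ pvOptStr (da.get? p) ++ " B=" ++ pvOptStr (db.get? p)]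
      else diffs) [] = xs.filterMap (pvMsg da db) := by
  have h : (fun (diffs : List String) (p : String) =>
      if da.get? p = none then diffs ++ ["path only in B: " ++ p ++ " -> " ++ pvOptStr (db.get? p)]
      else if db.get? p = none then diffs ++ ["path only in A: " ++ p ++ " -> " ++ pvOptStr (da.get? p)]
      else if da.get? p ≠ db.get? p then diffs ++ ["path " ++ p ++ ": A=" ++ pvOptStr (da.get? p) ++ " B=" ++ pvOptStr (db.get? p)]
      else diffs) = fun diffs p => diffs ++ ((pvMsg da db p).toList) := by
    funext diffs p
    cases ha : da.get? p <;> cases hb : db.get? p <;>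
      simp [pvMsg, ha, hb, pvOptStr] <;> split_ifs <;> simp_all
  rw [h, PySem.List.foldl_append_eq_flatMap, pvFlatMap_toList_eq_filterMap]
  simp

-- membership characterisations ------------------------------------------------

theorem pvPair_eq_some {da db : PySem.Dict String String} {p : String} {x : String × String}
    (h : pvPair da db p = some x) : x.1 = p ∧ pvMsg da db p = some x.2 := by
  simp [pvPair] at h
  obtain ⟨m, hm, hx⟩ := h
  subst hx; exact ⟨rfl, hm⟩

theorem pv_mem_L (da db : PySem.Dict String String) (S : List String) (x : String × String) :
    x ∈ S.filterMap (pvPair da db) ↔ x.1 ∈ S ∧ pvPair da db x.1 = some x := by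
  constructor
  · intro h
    obtain ⟨p, hp, hg⟩ := List.mem_filterMap.mp h
    obtain ⟨h1, _⟩ := pvPair_eq_some hg
    subst h1; exact ⟨hp, hg⟩
  · intro ⟨h1, h2⟩
    exact List.mem_filterMap.mpr ⟨x.1, h1, h2⟩

theorem pv_getD_some {da : PySem.Dict String String} {p : String} {sa : String}
    (h : da.get? p = some sa) : da.getD p "" = sa := by
  unfold PySem.Dict.getD
  rw [h]
  rfl

-- pvPair characterised by the three categories
theorem pv_pair_cases (da db : PySem.Dict String String) (x : String × String) :
    ((x.1 ∈ da.keys ∨ x.1 ∈ db.keys) ∧ pvPair da db x.1 = some x) ↔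
      ((x.1 ∈ da.keys ∧ x.1 ∉ db.keys ∧ x.2 = "path only in A: " ++ x.1 ++ " -> " ++ da.getD x.1 "")
      ∨ (x.1 ∈ db.keys ∧ x.1 ∉ da.keys ∧ x.2 = "path only in B: " ++ x.1 ++ " -> " ++ db.getD x.1 "")
      ∨ (x.1 ∈ da.keys ∧ x.1 ∈ db.keys ∧ da.getD x.1 "" ≠ db.getD x.1 ""
          ∧ x.2 = "path " ++ x.1 ++ ": A=" ++ da.getD x.1 "" ++ " B=" ++ db.getD x.1 "")) := by
  have hamem : x.1 ∈ da.keys ↔ ¬ (da.get? x.1 = none) := by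
    rw [PySem.Dict.get?_eq_none_iff_not_mem_keys]; tauto
  have hbmem : x.1 ∈ db.keys ↔ ¬ (db.get? x.1 = none) := by
    rw [PySem.Dict.get?_eq_none_iff_not_mem_keys]; tauto
  cases ha : da.get? x.1 with
  | none =>
    cases hb : db.get? x.1 with
    | none =>
      simp only [hamem, hbmem, ha, hb, pvPair, pvMsg, pvOptStr]
      simp
    | some sb =>
      simp only [hamem, hbmem, ha, hb, pvPair, pvMsg, pvOptStr, pv_getD_some hb]
      simp [Prod.ext_iff, eq_comm]
  | some sa =>
    cases hb : db.get? x.1 with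
    | none =>
      simp only [hamem, hbmem, ha, hb, pvPair, pvMsg, pvOptStr, pv_getD_some ha]
      simp [Prod.ext_iff, eq_comm]
    | some sb =>
      simp only [hamem, hbmem, ha, hb, pvPair, pvMsg, pvOptStr, pv_getD_some ha, pv_getD_some hb]
      by_cases hne : sa = sb
      · simp [hne]
      · simp [hne, Prod.ext_iff, eq_comm]


theorem pv_mem_onlyA (da db : PySem.Dict String String) (x : String × String) :
    x ∈ (da.keys.filter (fun p => !(db.contains p))).map
        (fun p => (p, "path only in A: " ++ p ++ " -> " ++ da.getD p "")) ↔
      x.1 ∈ da.keys ∧ x.1 ∉ db.keys ∧ x.2 = "path only in A: " ++ x.1 ++ " -> " ++ da.getD x.1 "" := by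
  simp only [List.mem_map, List.mem_filter, Bool.not_eq_true', ← Bool.not_eq_true,
    PySem.Dict.contains_iff_mem_keys, Prod.ext_iff]
  constructor
  · rintro ⟨p, ⟨hp, hc⟩, h1, h2⟩
    exact ⟨h1 ▸ hp, h1 ▸ hc, h1 ▸ h2.symm⟩
  · rintro ⟨h1, h2, h3⟩
    exact ⟨x.1, ⟨h1, h2⟩, rfl, h3.symm⟩

theorem pv_mem_onlyB (da db : PySem.Dict String String) (x : String × String) :
    x ∈ (db.keys.filter (fun p => !(da.contains p))).map
        (fun p => (p, "path only in B: " ++ p ++ " -> " ++ db.getD p "")) ↔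
      x.1 ∈ db.keys ∧ x.1 ∉ da.keys ∧ x.2 = "path only in B: " ++ x.1 ++ " -> " ++ db.getD x.1 "" := by
  simp only [List.mem_map, List.mem_filter, Bool.not_eq_true', ← Bool.not_eq_true,
    PySem.Dict.contains_iff_mem_keys, Prod.ext_iff]
  constructor
  · rintro ⟨p, ⟨hp, hc⟩, h1, h2⟩
    exact ⟨h1 ▸ hp, h1 ▸ hc, h1 ▸ h2.symm⟩
  · rintro ⟨h1, h2, h3⟩
    exact ⟨x.1, ⟨h1, h2⟩, rfl, h3.symm⟩

theorem pv_mem_changed (da db : PySem.Dict String String) (x : String × String) :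
    x ∈ (da.keys.filter (fun p => db.contains p && !(da.getD p "" == db.getD p ""))).map
        (fun p => (p, "path " ++ p ++ ": A=" ++ da.getD p "" ++ " B=" ++ db.getD p "")) ↔
      x.1 ∈ da.keys ∧ x.1 ∈ db.keys ∧ da.getD x.1 "" ≠ db.getD x.1 ""
        ∧ x.2 = "path " ++ x.1 ++ ": A=" ++ da.getD x.1 "" ++ " B=" ++ db.getD x.1 "" := by
  simp only [List.mem_map, List.mem_filter, Bool.and_eq_true, Bool.not_eq_true', beq_eq_false_iff_ne,
    PySem.Dict.contains_iff_mem_keys, Prod.ext_iff]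
  constructor
  · rintro ⟨p, ⟨hp, hc, hd⟩, h1, h2⟩
    exact ⟨h1 ▸ hp, h1 ▸ hc, h1 ▸ hd, h1 ▸ h2.symm⟩
  · rintro ⟨h1, h2, h3, h4⟩
    exact ⟨x.1, ⟨h1, h2, h3⟩, rfl, h4.symm⟩

-- the combined classified list is a permutation of the filterMap over the sorted union
theorem pv_perm (da db : PySem.Dict String String) (hna : da.keys.Nodup) (hnb : db.keys.Nodup) :
    List.Perm
      ((PySem.List.sorted (PySem.Set.union (PySem.Set.ofList da.keys) db.keys) (fun p => p)).filterMap
        (pvPair da db))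
      (((da.keys.filter (fun p => !(db.contains p))).map
          (fun p => (p, "path only in A: " ++ p ++ " -> " ++ da.getD p "")))
        ++ ((db.keys.filter (fun p => !(da.contains p))).map
          (fun p => (p, "path only in B: " ++ p ++ " -> " ++ db.getD p "")))
        ++ ((da.keys.filter (fun p => db.contains p && !(da.getD p "" == db.getD p ""))).map
          (fun p => (p, "path " ++ p ++ ": A=" ++ da.getD p "" ++ " B=" ++ db.getD p "")))) := by
  have hU : (PySem.Set.union (PySem.Set.ofList da.keys) db.keys).Nodup :=
    PySem.Set.nodup_union _ _ (PySem.Set.nodup_ofList _)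
  have hS : (PySem.List.sorted (PySem.Set.union (PySem.Set.ofList da.keys) db.keys)
      (fun p => p)).Nodup := (PySem.List.sorted_perm _ _ _).nodup_iff.mpr hU
  have hSlt : (PySem.List.sorted (PySem.Set.union (PySem.Set.ofList da.keys) db.keys)
      (fun p => p)).Pairwise (· < ·) := by
    have := (PySem.List.sorted_pairwise (PySem.Set.union (PySem.Set.ofList da.keys) db.keys)
      (fun p => p)).and hS
    exact this.imp (fun h => lt_of_le_of_ne h.1 h.2)
  have hLlt : ((PySem.List.sorted (PySem.Set.union (PySem.Set.ofList da.keys) db.keys)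
      (fun p => p)).filterMap (pvPair da db)).Pairwise (fun a b => a.1 < b.1) := by
    refine List.pairwise_filterMap.mpr (hSlt.imp ?_)
    intro a b hab x hx y hy
    rw [(pvPair_eq_some hx).1, (pvPair_eq_some hy).1]
    exact hab
  have hLnd : ((PySem.List.sorted (PySem.Set.union (PySem.Set.ofList da.keys) db.keys)
      (fun p => p)).filterMap (pvPair da db)).Nodup :=
    hLlt.imp (fun h heq => absurd (heq ▸ h) (lt_irrefl _))
  have hinj1 : Function.Injective (fun p => (p, "path only in A: " ++ p ++ " -> " ++ da.getD p "")) :=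
    fun a b h => congrArg Prod.fst h
  have hinj2 : Function.Injective (fun p => (p, "path only in B: " ++ p ++ " -> " ++ db.getD p "")) :=
    fun a b h => congrArg Prod.fst h
  have hinj3 : Function.Injective (fun p => (p, "path " ++ p ++ ": A=" ++ da.getD p "" ++ " B=" ++ db.getD p "")) :=
    fun a b h => congrArg Prod.fst h
  have hRnd : (((da.keys.filter (fun p => !(db.contains p))).map
          (fun p => (p, "path only in A: " ++ p ++ " -> " ++ da.getD p "")))
        ++ ((db.keys.filter (fun p => !(da.contains p))).map
          (fun p => (p, "path only in B: " ++ p ++ " -> " ++ db.getD p "")))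
        ++ ((da.keys.filter (fun p => db.contains p && !(da.getD p "" == db.getD p ""))).map
          (fun p => (p, "path " ++ p ++ ": A=" ++ da.getD p "" ++ " B=" ++ db.getD p "")))).Nodup := by
    rw [List.nodup_append, List.nodup_append]
    refine ⟨⟨(hna.filter _).map hinj1, (hnb.filter _).map hinj2, ?_⟩,
      (hna.filter _).map hinj3, ?_⟩
    · intro x hx y hy heq
      rw [pv_mem_onlyA] at hx
      rw [pv_mem_onlyB] at hy
      exact hy.2.1 (heq ▸ hx.1)
    · intro x hx y hy heq
      rw [List.mem_append] at hx
      rw [pv_mem_changed] at hy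
      rcases hx with hx | hx
      · rw [pv_mem_onlyA] at hx
        exact hx.2.1 (heq ▸ hy.2.1)
      · rw [pv_mem_onlyB] at hx
        exact hx.2.1 (heq ▸ hy.1)
  refine (List.perm_ext_iff_of_nodup hLnd hRnd).mpr ?_
  intro x
  rw [pv_mem_L, PySem.List.mem_sorted, PySem.Set.mem_union, PySem.Set.mem_ofList,
    pv_pair_cases, List.mem_append, List.mem_append, pv_mem_onlyA, pv_mem_onlyB, pv_mem_changed]
  tauto

theorem pv_sorted_eq (da db : PySem.Dict String String) (hna : da.keys.Nodup) (hnb : db.keys.Nodup) :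
    PySem.List.sorted
      (((da.keys.filter (fun p => !(db.contains p))).map
          (fun p => (p, "path only in A: " ++ p ++ " -> " ++ da.getD p "")))
        ++ ((db.keys.filter (fun p => !(da.contains p))).map
          (fun p => (p, "path only in B: " ++ p ++ " -> " ++ db.getD p "")))
        ++ ((da.keys.filter (fun p => db.contains p && !(da.getD p "" == db.getD p ""))).map
          (fun p => (p, "path " ++ p ++ ": A=" ++ da.getD p "" ++ " B=" ++ db.getD p ""))))
      (fun t => t.1) =
    (PySem.List.sorted (PySem.Set.union (PySem.Set.ofList da.keys) db.keys) (fun p => p)).filterMap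
      (pvPair da db) := by
  refine PySem.List.sorted_eq_of_perm_of_pairwise_lt _ _ _ ((pv_perm da db hna hnb)) ?_
  have hU : (PySem.Set.union (PySem.Set.ofList da.keys) db.keys).Nodup :=
    PySem.Set.nodup_union _ _ (PySem.Set.nodup_ofList _)
  have hS : (PySem.List.sorted (PySem.Set.union (PySem.Set.ofList da.keys) db.keys)
      (fun p => p)).Nodup := (PySem.List.sorted_perm _ _ _).nodup_iff.mpr hU
  have hSlt : (PySem.List.sorted (PySem.Set.union (PySem.Set.ofList da.keys) db.keys)
      (fun p => p)).Pairwise (· < ·) := by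
    have := (PySem.List.sorted_pairwise (PySem.Set.union (PySem.Set.ofList da.keys) db.keys)
      (fun p => p)).and hS
    exact this.imp (fun h => lt_of_le_of_ne h.1 h.2)
  refine List.pairwise_filterMap.mpr (hSlt.imp ?_)
  intro a b hab x hx y hy
  rw [(pvPair_eq_some hx).1, (pvPair_eq_some hy).1]
  exact hab

theorem pv_map_snd (da db : PySem.Dict String String) (S : List String) :
    (S.filterMap (pvPair da db)).map (fun t => t.2) = S.filterMap (pvMsg da db) := by
  rw [List.map_filterMap]
  simp [pvPair, Option.map_map, Function.comp_def]

theorem compare_tree_maps_spec : Claim_equal_compare_tree_maps := by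
  intro map_a map_b _ hpre
  obtain ⟨hna0, hnb0⟩ := hpre
  have hna : (PySem.Dict.mk map_a).keys.Nodup := by rw [PySem.Dict.keys_mk]; exact hna0
  have hnb : (PySem.Dict.mk map_b).keys.Nodup := by rw [PySem.Dict.keys_mk]; exact hnb0
  simp only [Spec_compare_tree_maps, compare_tree_maps, compare_tree_maps_alt]
  rw [pvA_diffs, pv_sorted_eq _ _ hna hnb, pv_map_snd]
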